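-- pv_equiv track=rewrite | github.com/therealkraus/learning | python/labs109.py | substitution_words
-- ===== SOURCE A (Python) =====
-- def substitution_words(pattern, words):
--     result = []
--
--     subbed_pattern = dict.fromkeys(pattern)
--     subbed_pattern.update((k, i) for i, k in enumerate(subbed_pattern))
--
--     pattern_transformed = "".join(
--         str(subbed_pattern[l]) for l in pattern if l in subbed_pattern
--     )
--
--     for w in words:
--         if len(w) == len(pattern):
--             subbed_w = dict.fromkeys(w)
--             subbed_w.update((k, i) for i, k in enumerate(subbed_w))
--
--             w_transformed = "".join(str(subbed_w[l]) for l in w if l in subbed_w)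
--
--             if pattern_transformed == w_transformed:
--                 result.append(w)
--
--     return result
-- ===== SOURCE B (Python) =====
-- def substitution_words(pattern, words):
--     n_p = len(set(pattern))
--     result = []
--     for w in words:
--         if len(w) == len(pattern) and len(set(zip(pattern, w))) == n_p == len(set(w)):
--             result.append(w)
--     return result
-- ===== Notes on version B (the rewrite author's own statement) =====
-- stated objective: faster
-- what changed: B drops A's per-word normalized digit-string construction (two dict passes plus str() joins per word) and tests each word for isomorphism with the pattern directly via the set-of-zipped-pairs bijection check len(set(zip(pattern,w))) == len(set(pattern)) == len(set(w)), precomputing len(set(pattern)) once.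
-- intended difference: On inputs containing an equal-length word whose digit-concatenated first-occurrence-rank string equals the pattern's while the rank sequences differ (possible once some rank reaches 10, e.g. ranks ...,1,11 vs ...,11,1), A wrongly includes the non-isomorphic word; B excludes it, which is the intended letter-substitution match. — e.g. on substitution_words("abcdefghijklbm", ["abcdefghijkllc"]): A returns ["abcdefghijkllc"], B returns []
import Mathlib
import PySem

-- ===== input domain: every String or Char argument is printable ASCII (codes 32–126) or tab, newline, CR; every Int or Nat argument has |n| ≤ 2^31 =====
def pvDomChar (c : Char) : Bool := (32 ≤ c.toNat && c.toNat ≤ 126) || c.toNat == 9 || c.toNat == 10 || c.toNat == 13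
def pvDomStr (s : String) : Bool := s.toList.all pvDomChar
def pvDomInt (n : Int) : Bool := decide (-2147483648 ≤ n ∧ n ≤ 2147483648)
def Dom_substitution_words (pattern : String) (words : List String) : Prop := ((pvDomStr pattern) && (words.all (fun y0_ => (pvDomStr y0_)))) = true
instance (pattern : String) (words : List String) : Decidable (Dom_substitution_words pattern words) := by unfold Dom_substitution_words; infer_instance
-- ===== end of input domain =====

-- B replaces A's normalized digit-string comparison by a direct set-of-zipped-pairs isomorphism
-- test; A wrongly matches words when its digit-concatenated rank strings collide (see D_ below).


-- ===== PORT A =====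
-- dict.fromkeys(s) (= ordered dedup of the keys), update((k, i) for i, k in enumerate(...)),
-- then "".join(str(d[l]) for l in s if l in d)
def pvTransformA (s : List Char) : String :=
  let keys := PySem.List.dedup s
  let d : PySem.Dict Char Int :=
    (PySem.List.enumerate keys).foldl (fun d p => d.insert p.2 p.1) PySem.Dict.empty
  PySem.Str.join "" ((s.filter (fun c => d.contains c)).map (fun c => PySem.Int.toStr (d.getD c 0)))

def substitution_words (pattern : String) (words : List String) : List String :=
  let patternT := pvTransformA pattern.toList
  words.foldl (fun result w =>
    if PySem.Str.len w = PySem.Str.len pattern then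
      if patternT = pvTransformA w.toList then result ++ [w] else result
    else result) []

-- ===== PORT B =====
def substitution_words_alt (pattern : String) (words : List String) : List String :=
  let np := (PySem.Set.ofList pattern.toList).length
  words.foldl (fun result w =>
    if PySem.Str.len w = PySem.Str.len pattern ∧
       (PySem.Set.ofList (pattern.toList.zip w.toList)).length = np ∧
       np = (PySem.Set.ofList w.toList).length
    then result ++ [w] else result) []

-- ===== PRECONDITION & SPEC =====
-- first-occurrence rank sequence of a string, and its digit-concatenated form (A's canonical string)
def pvRanks (s : String) : List Nat := s.toList.map (fun c => (PySem.List.dedup s.toList).idxOf c)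
def pvRanksStr (s : String) : String :=
  PySem.Str.join "" ((pvRanks s).map (fun n : Nat => PySem.Int.toStr (n : Int)))

-- On inputs containing an equal-length word whose digit-concatenated first-occurrence-rank string
-- equals the pattern's while the rank sequences differ (possible once some rank reaches 10), A
-- wrongly includes the non-isomorphic word; B excludes it, the intended letter-substitution match.
def D_substitution_words (pattern : String) (words : List String) : Prop :=
  ∃ w ∈ words, PySem.Str.len w = PySem.Str.len pattern ∧
    pvRanksStr w = pvRanksStr pattern ∧ pvRanks w ≠ pvRanks pattern
instance (pattern : String) (words : List String) : Decidable (D_substitution_words pattern words) := by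
  unfold D_substitution_words; infer_instance

def Spec_substitution_words (pattern : String) (words : List String) (out : List String) : Prop :=
  ¬ D_substitution_words pattern words → out = substitution_words_alt pattern words
instance (pattern : String) (words : List String) (out : List String) : Decidable (Spec_substitution_words pattern words out) := by
  unfold Spec_substitution_words; infer_instance

def pvDiffWitness_substitution_words : String × List String := ("abcdefghijklbm", ["abcdefghijkllc"])
def pvDiffWitnessOut_substitution_words : (List String) × (List String) := (["abcdefghijkllc"], [])

-- ===== CLAIM (what is proved, stated in full; the proofs are below) =====
def Claim_unchanged_substitution_words : Prop := ∀ (pattern : String) (words : List String), Dom_substitution_words pattern words → Spec_substitution_words pattern words (substitution_words pattern words)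
def Claim_changed_substitution_words : Prop := Dom_substitution_words (pvDiffWitness_substitution_words.1) (pvDiffWitness_substitution_words.2) ∧ D_substitution_words (pvDiffWitness_substitution_words.1) (pvDiffWitness_substitution_words.2) ∧ substitution_words (pvDiffWitness_substitution_words.1) (pvDiffWitness_substitution_words.2) = pvDiffWitnessOut_substitution_words.1 ∧ substitution_words_alt (pvDiffWitness_substitution_words.1) (pvDiffWitness_substitution_words.2) = pvDiffWitnessOut_substitution_words.2 ∧ pvDiffWitnessOut_substitution_words.1 ≠ pvDiffWitnessOut_substitution_words.2
def Claim_exact_substitution_words : Prop := ∀ (pattern : String) (words : List String), Dom_substitution_words pattern words → D_substitution_words pattern words → substitution_words pattern words ≠ substitution_words_alt pattern words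

-- ===== LEMMAS AND PROOFS =====

lemma len_ofList_eq_card {α : Type} [BEq α] [LawfulBEq α] [DecidableEq α] (l : List α) :
    (PySem.Set.ofList l).length = l.toFinset.card := by
  have hnd : (PySem.Set.ofList l).Nodup := PySem.Set.nodup_ofList l
  have hfs : (PySem.Set.ofList l).toFinset = l.toFinset := by
    ext x; simp [List.mem_toFinset, PySem.Set.mem_ofList]
  rw [← List.toFinset_card_of_nodup hnd, hfs]

lemma len_ofList_map_eq_iff {α β : Type} [BEq α] [LawfulBEq α] [DecidableEq α]
    [BEq β] [LawfulBEq β] [DecidableEq β] (l : List α) (f : α → β) :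
    (PySem.Set.ofList (l.map f)).length = (PySem.Set.ofList l).length ↔
      ∀ a ∈ l, ∀ b ∈ l, f a = f b → a = b := by
  have hm : (l.map f).toFinset = l.toFinset.image f := by ext x; simp
  rw [len_ofList_eq_card, len_ofList_eq_card, hm, Finset.card_image_iff]
  constructor
  · intro h a ha b hb hf
    exact h (by simpa using ha) (by simpa using hb) hf
  · intro h a ha b hb hf
    exact h a (by simpa using ha) b (by simpa using hb) hf

lemma ofList_map_of_inj {α β : Type} [BEq α] [LawfulBEq α] [DecidableEq α]
    [BEq β] [LawfulBEq β] [DecidableEq β] (l : List α) (f : α → β)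
    (h : ∀ a ∈ l, ∀ b ∈ l, f a = f b → a = b) :
    PySem.Set.ofList (l.map f) = (PySem.Set.ofList l).map f := by
  induction l using List.reverseRecOn with
  | nil => rfl
  | append_singleton xs x ih =>
    have h' : ∀ a ∈ xs, ∀ b ∈ xs, f a = f b → a = b := by
      intro a ha b hb; exact h a (by simp [ha]) b (by simp [hb])
    rw [List.map_append, List.map_singleton, PySem.Set.ofList_append_singleton,
        PySem.Set.ofList_append_singleton, ih h']
    by_cases hx : x ∈ PySem.Set.ofList xs
    · have hfx : f x ∈ (PySem.Set.ofList xs).map f := List.mem_map_of_mem hx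
      simp [PySem.Set.add, hx, hfx]
    · have hfx : f x ∉ (PySem.Set.ofList xs).map f := by
        intro hmem
        obtain ⟨a, ha, hfa⟩ := List.mem_map.mp hmem
        have ha' : a ∈ xs := (PySem.Set.mem_ofList xs a).mp ha
        have := h a (by simp [ha']) x (by simp) hfa
        exact hx (this ▸ ha)
      simp [PySem.Set.add, hx, hfx]

lemma idxOf_map_of_inj {α β : Type} [BEq α] [LawfulBEq α] [DecidableEq α]
    [BEq β] [LawfulBEq β] [DecidableEq β] (l : List α) (f : α → β)
    (h : ∀ a ∈ l, ∀ b ∈ l, f a = f b → a = b) (a : α) (ha : a ∈ l) :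
    (l.map f).idxOf (f a) = l.idxOf a := by
  induction l with
  | nil => simp at ha
  | cons b t ih =>
    by_cases hba : b = a
    · subst hba; simp
    · have hfba : f b ≠ f a := fun hf => hba (h b (by simp) a ha hf)
      have ha' : a ∈ t := by
        rcases List.mem_cons.mp ha with h1 | h1
        · exact absurd h1.symm hba
        · exact h1
      have h' : ∀ x ∈ t, ∀ y ∈ t, f x = f y → x = y := by
        intro x hx y hy; exact h x (by simp [hx]) y (by simp [hy])
      simp [hba, hfba, ih h' ha']

lemma eq_of_idxOf_eq {α : Type} [BEq α] [LawfulBEq α] {l : List α} {a b : α}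
    (ha : a ∈ l) (h : l.idxOf a = l.idxOf b) : a = b :=
  (List.idxOf_inj ha).mp h

-- the per-word core: isomorphism test ↔ equal first-occurrence-rank sequences
lemma core_iff (p w : List Char) (hlen : p.length = w.length) :
    ((PySem.Set.ofList (p.zip w)).length = (PySem.Set.ofList p).length ∧
     (PySem.Set.ofList p).length = (PySem.Set.ofList w).length) ↔
    p.map (fun c => (PySem.Set.ofList p).idxOf c) = w.map (fun c => (PySem.Set.ofList w).idxOf c) := by
  set zs := p.zip w with hzs
  have hfst : zs.map Prod.fst = p := List.map_fst_zip (le_of_eq hlen)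
  have hsnd : zs.map Prod.snd = w := List.map_snd_zip (le_of_eq hlen.symm)
  constructor
  · rintro ⟨h1, h2⟩
    have hinjf : ∀ a ∈ zs, ∀ b ∈ zs, a.1 = b.1 → a = b := by
      apply (len_ofList_map_eq_iff zs Prod.fst).mp
      rw [hfst]; omega
    have hinjs : ∀ a ∈ zs, ∀ b ∈ zs, a.2 = b.2 → a = b := by
      apply (len_ofList_map_eq_iff zs Prod.snd).mp
      rw [hsnd]; omega
    have hinjf' : ∀ a ∈ PySem.Set.ofList zs, ∀ b ∈ PySem.Set.ofList zs, a.1 = b.1 → a = b := by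
      intro a ha b hb
      exact hinjf a ((PySem.Set.mem_ofList zs a).mp ha) b ((PySem.Set.mem_ofList zs b).mp hb)
    have hinjs' : ∀ a ∈ PySem.Set.ofList zs, ∀ b ∈ PySem.Set.ofList zs, a.2 = b.2 → a = b := by
      intro a ha b hb
      exact hinjs a ((PySem.Set.mem_ofList zs a).mp ha) b ((PySem.Set.mem_ofList zs b).mp hb)
    have e1 : PySem.Set.ofList (zs.map Prod.fst) = (PySem.Set.ofList zs).map Prod.fst :=
      ofList_map_of_inj zs Prod.fst hinjf
    have e2 : PySem.Set.ofList (zs.map Prod.snd) = (PySem.Set.ofList zs).map Prod.snd :=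
      ofList_map_of_inj zs Prod.snd hinjs
    rw [← hfst, ← hsnd, List.map_map, List.map_map]
    apply List.map_congr_left
    intro a ha
    have hmem : a ∈ PySem.Set.ofList zs := (PySem.Set.mem_ofList zs a).mpr ha
    show (PySem.Set.ofList (zs.map Prod.fst)).idxOf a.1 = (PySem.Set.ofList (zs.map Prod.snd)).idxOf a.2
    rw [e1, e2, idxOf_map_of_inj _ Prod.fst hinjf' _ hmem, idxOf_map_of_inj _ Prod.snd hinjs' _ hmem]
  · intro hrk
    rw [← hfst, ← hsnd, List.map_map, List.map_map] at hrk
    have hidx := List.map_inj_left.mp hrk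
    rw [hfst, hsnd] at hidx
    simp only [Function.comp_apply] at hidx
    have key : ∀ a ∈ zs, ∀ b ∈ zs, (a.1 = b.1 ↔ a.2 = b.2) := by
      intro a ha b hb
      have hmw : ∀ x ∈ zs, (x : Char × Char).2 ∈ w := by
        intro x hx; rw [← hsnd]; exact List.mem_map_of_mem hx
      have hmp : ∀ x ∈ zs, (x : Char × Char).1 ∈ p := by
        intro x hx; rw [← hfst]; exact List.mem_map_of_mem hx
      constructor
      · intro h
        apply eq_of_idxOf_eq ((PySem.Set.mem_ofList w _).mpr (hmw a ha))
        rw [← hidx a ha, ← hidx b hb, h]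
      · intro h
        apply eq_of_idxOf_eq ((PySem.Set.mem_ofList p _).mpr (hmp a ha))
        rw [hidx a ha, hidx b hb, h]
    have hinjf : ∀ a ∈ zs, ∀ b ∈ zs, a.1 = b.1 → a = b := by
      intro a ha b hb h
      exact Prod.ext h ((key a ha b hb).mp h)
    have hinjs : ∀ a ∈ zs, ∀ b ∈ zs, a.2 = b.2 → a = b := by
      intro a ha b hb h
      exact Prod.ext ((key a ha b hb).mpr h) h
    have h1 := (len_ofList_map_eq_iff zs Prod.fst).mpr hinjf
    have h2 := (len_ofList_map_eq_iff zs Prod.snd).mpr hinjs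
    rw [hfst] at h1
    rw [hsnd] at h2
    exact ⟨h1.symm, by omega⟩

-- A's rank dictionary looks up the index in the dedup list
lemma dictRank_contains (ks : List Char) (c : Char) :
    ((PySem.List.enumerate ks).foldl (fun d p => d.insert p.2 p.1) (PySem.Dict.empty : PySem.Dict Char Int)).contains c
      = decide (c ∈ ks) := by
  rw [PySem.Dict.contains_eq_decide_mem_keys]
  have hk := PySem.Dict.keys_foldl_insert_key (l := PySem.List.enumerate ks)
      (key := Prod.snd) (f := fun d p => p.1) (d := (PySem.Dict.empty : PySem.Dict Char Int))
  rw [hk, PySem.List.map_snd_enumerate]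
  simp only [PySem.Dict.keys_empty, PySem.Set.update_nil_left]
  simp [PySem.Set.mem_ofList]

lemma dictRank_getD (ks : List Char) (hnd : ks.Nodup) (c : Char) (hc : c ∈ ks) :
    ((PySem.List.enumerate ks).foldl (fun d p => d.insert p.2 p.1) (PySem.Dict.empty : PySem.Dict Char Int)).getD c 0
      = (ks.idxOf c : Int) := by
  induction ks using List.reverseRecOn with
  | nil => simp at hc
  | append_singleton xs x ih =>
    have hx : x ∉ xs := by
      have h := hnd
      rw [List.nodup_append] at h
      intro hmem
      exact h.2.2 x hmem x (by simp) rfl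
    rw [PySem.List.enumerate_append, List.foldl_append]
    rw [show PySem.List.enumerate [x] (0 + xs.length) = [((0 + xs.length : Int), x)] from by
      rw [PySem.List.enumerate_cons, PySem.List.enumerate_nil]]
    simp only [List.foldl_cons, List.foldl_nil]
    rw [PySem.Dict.getD_insert]
    by_cases hcx : c = x
    · subst hcx
      rw [if_pos rfl, List.idxOf_append_of_notMem hx]
      simp
    · have hc' : c ∈ xs := by
        rcases List.mem_append.mp hc with h | h
        · exact h
        · simp at h; exact absurd h hcx
      rw [if_neg hcx, ih (List.nodup_append.mp hnd).1 hc']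
      rw [List.idxOf_append_of_mem hc']

-- A's transform is the digit-concatenated rank string
lemma transformA_eq (s : String) : pvTransformA s.toList = pvRanksStr s := by
  show PySem.Str.join "" ((s.toList.filter (fun c =>
      ((PySem.List.enumerate (PySem.List.dedup s.toList)).foldl (fun d p => d.insert p.2 p.1)
        (PySem.Dict.empty : PySem.Dict Char Int)).contains c)).map (fun c =>
      PySem.Int.toStr (((PySem.List.enumerate (PySem.List.dedup s.toList)).foldl
        (fun d p => d.insert p.2 p.1) (PySem.Dict.empty : PySem.Dict Char Int)).getD c 0)))
    = PySem.Str.join "" ((s.toList.map (fun c => (PySem.List.dedup s.toList).idxOf c)).map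
        (fun n : Nat => PySem.Int.toStr (n : Int)))
  have hfil : s.toList.filter (fun c =>
      ((PySem.List.enumerate (PySem.List.dedup s.toList)).foldl (fun d p => d.insert p.2 p.1)
        (PySem.Dict.empty : PySem.Dict Char Int)).contains c) = s.toList := by
    apply List.filter_eq_self.mpr
    intro c hc
    rw [dictRank_contains]
    exact decide_eq_true ((PySem.List.mem_dedup _ _).mpr hc)
  rw [hfil, List.map_map]
  congr 1
  apply List.map_congr_left
  intro c hc
  simp only [Function.comp_apply]
  rw [dictRank_getD _ (PySem.List.nodup_dedup _) c ((PySem.List.mem_dedup _ _).mpr hc)]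

-- the two ports as filters
lemma A_as_filter (pattern : String) (words : List String) :
    substitution_words pattern words = words.filter (fun w =>
      decide (PySem.Str.len w = PySem.Str.len pattern ∧
              pvTransformA pattern.toList = pvTransformA w.toList)) := by
  have hstep : ∀ (acc : List String) (w : String), w ∈ words →
      (if PySem.Str.len w = PySem.Str.len pattern then
        if pvTransformA pattern.toList = pvTransformA w.toList then acc ++ [w] else acc
      else acc)
      = (if PySem.Str.len w = PySem.Str.len pattern ∧
            pvTransformA pattern.toList = pvTransformA w.toList then acc ++ [w] else acc) := by
    intro acc w _
    split_ifs <;> simp_all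
  calc substitution_words pattern words
      = words.foldl (fun acc w =>
          if PySem.Str.len w = PySem.Str.len pattern ∧
             pvTransformA pattern.toList = pvTransformA w.toList then acc ++ [w] else acc) [] :=
        PySem.List.foldl_congr_mem _ _ _ _ hstep
    _ = [] ++ words.filter (fun w =>
          decide (PySem.Str.len w = PySem.Str.len pattern ∧
                  pvTransformA pattern.toList = pvTransformA w.toList)) :=
        PySem.List.foldl_append_ite_eq_filter _ _ _
    _ = _ := by simp

lemma B_as_filter (pattern : String) (words : List String) :
    substitution_words_alt pattern words = words.filter (fun w =>
      decide (PySem.Str.len w = PySem.Str.len pattern ∧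
              (PySem.Set.ofList (pattern.toList.zip w.toList)).length = (PySem.Set.ofList pattern.toList).length ∧
              (PySem.Set.ofList pattern.toList).length = (PySem.Set.ofList w.toList).length)) := by
  calc substitution_words_alt pattern words
      = [] ++ words.filter (fun w =>
          decide (PySem.Str.len w = PySem.Str.len pattern ∧
              (PySem.Set.ofList (pattern.toList.zip w.toList)).length = (PySem.Set.ofList pattern.toList).length ∧
              (PySem.Set.ofList pattern.toList).length = (PySem.Set.ofList w.toList).length)) :=
        PySem.List.foldl_append_ite_eq_filter _ _ _
    _ = _ := by simp

-- ranks in terms of Set.ofList, and rank equality vs the isomorphism test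
lemma ranks_eq_iff_iso (pattern w : String) (hlen : PySem.Str.len w = PySem.Str.len pattern) :
    pvRanks w = pvRanks pattern ↔
      ((PySem.Set.ofList (pattern.toList.zip w.toList)).length = (PySem.Set.ofList pattern.toList).length ∧
       (PySem.Set.ofList pattern.toList).length = (PySem.Set.ofList w.toList).length) := by
  have hlen' : pattern.toList.length = w.toList.length := by
    simpa [PySem.Str.len_eq] using hlen.symm
  rw [show pvRanks w = w.toList.map (fun c => (PySem.Set.ofList w.toList).idxOf c) from by
        unfold pvRanks; rw [PySem.List.dedup_eq_ofList],
      show pvRanks pattern = pattern.toList.map (fun c => (PySem.Set.ofList pattern.toList).idxOf c) from by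
        unfold pvRanks; rw [PySem.List.dedup_eq_ofList]]
  rw [core_iff pattern.toList w.toList hlen']
  exact eq_comm

lemma ranks_eq_imp_streq (pattern w : String) (h : pvRanks w = pvRanks pattern) :
    pvTransformA pattern.toList = pvTransformA w.toList := by
  rw [transformA_eq, transformA_eq]
  unfold pvRanksStr
  rw [h]

-- per-word predicate equivalence, outside the collision region
lemma pred_iff (pattern w : String)
    (hw : ¬(PySem.Str.len w = PySem.Str.len pattern ∧
            pvRanksStr w = pvRanksStr pattern ∧ pvRanks w ≠ pvRanks pattern)) :
    (PySem.Str.len w = PySem.Str.len pattern ∧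
     pvTransformA pattern.toList = pvTransformA w.toList) ↔
    (PySem.Str.len w = PySem.Str.len pattern ∧
     (PySem.Set.ofList (pattern.toList.zip w.toList)).length = (PySem.Set.ofList pattern.toList).length ∧
     (PySem.Set.ofList pattern.toList).length = (PySem.Set.ofList w.toList).length) := by
  constructor
  · rintro ⟨hl, hT⟩
    refine ⟨hl, ?_⟩
    have hstr : pvRanksStr w = pvRanksStr pattern := by
      rw [transformA_eq, transformA_eq] at hT
      exact hT.symm
    have hrk : pvRanks w = pvRanks pattern := by
      by_contra hne
      exact hw ⟨hl, hstr, hne⟩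
    exact (ranks_eq_iff_iso pattern w hl).mp hrk
  · rintro ⟨hl, hiso⟩
    exact ⟨hl, ranks_eq_imp_streq pattern w ((ranks_eq_iff_iso pattern w hl).mpr hiso)⟩

-- a filter with a strictly weaker predicate and a separating witness is strictly shorter
lemma countP_lt_of_witness {α : Type} (l : List α) (pa pb : α → Bool)
    (himp : ∀ x ∈ l, pb x = true → pa x = true) (x0 : α) (hx0 : x0 ∈ l)
    (hpa : pa x0 = true) (hpb : pb x0 = false) :
    l.countP pb < l.countP pa := by
  induction l with
  | nil => simp at hx0
  | cons a t ih =>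
    rw [List.countP_cons, List.countP_cons]
    rcases List.mem_cons.mp hx0 with rfl | hmem
    · have hle : t.countP pb ≤ t.countP pa :=
        List.countP_mono_left (fun x hx => himp x (by simp [hx]))
      simp [hpa, hpb]
      omega
    · have hlt := ih (fun x hx h => himp x (by simp [hx]) h) hmem
      by_cases hb : pb a = true
      · have ha := himp a (by simp) hb
        simp [hb, ha]
        omega
      · rw [if_neg hb]
        split_ifs <;> omega

-- every word B accepts, A accepts
lemma predB_imp_predA (pattern w : String)
    (h : PySem.Str.len w = PySem.Str.len pattern ∧
         (PySem.Set.ofList (pattern.toList.zip w.toList)).length = (PySem.Set.ofList pattern.toList).length ∧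
         (PySem.Set.ofList pattern.toList).length = (PySem.Set.ofList w.toList).length) :
    PySem.Str.len w = PySem.Str.len pattern ∧
      pvTransformA pattern.toList = pvTransformA w.toList :=
  ⟨h.1, ranks_eq_imp_streq pattern w ((ranks_eq_iff_iso pattern w h.1).mpr h.2)⟩

-- ===== VERDICT (by name: the statement is the Claim_ definition above) =====
theorem substitution_words_spec : Claim_unchanged_substitution_words := by
  intro pattern words _ hnD
  rw [A_as_filter, B_as_filter]
  apply List.filter_congr
  intro w hw
  apply decide_eq_decide.mpr
  exact pred_iff pattern w (fun hcol => hnD ⟨w, hw, hcol⟩)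

theorem substitution_words_changed : Claim_changed_substitution_words := by
  unfold Claim_changed_substitution_words
  dsimp only [pvDiffWitness_substitution_words, pvDiffWitnessOut_substitution_words]
  have hT1 : pvTransformA ("abcdefghijklbm" : String).toList = "01234567891011112" := by decide
  have hT2 : pvTransformA ("abcdefghijkllc" : String).toList = "01234567891011112" := by decide
  refine ⟨by decide, ?_, ?_, by decide, by decide⟩
  · refine ⟨"abcdefghijkllc", by simp, by decide, ?_, by decide⟩
    rw [← transformA_eq, ← transformA_eq, hT1, hT2]
  · rw [A_as_filter]
    have hc : decide (PySem.Str.len ("abcdefghijkllc" : String) = PySem.Str.len ("abcdefghijklbm" : String) ∧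
        pvTransformA ("abcdefghijklbm" : String).toList = pvTransformA ("abcdefghijkllc" : String).toList) = true := by
      apply decide_eq_true
      exact ⟨by decide, by rw [hT1, hT2]⟩
    simp only [List.filter_cons, List.filter_nil, hc]
    simp

theorem substitution_words_tight : Claim_exact_substitution_words := by
  intro pattern words _ hD heq
  obtain ⟨w0, hmem, hlen0, hstr0, hrk0⟩ := hD
  rw [A_as_filter, B_as_filter] at heq
  have hlength := congrArg List.length heq
  rw [← List.countP_eq_length_filter, ← List.countP_eq_length_filter] at hlength
  have hlt := countP_lt_of_witness words
    (fun w => decide (PySem.Str.len w = PySem.Str.len pattern ∧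
        pvTransformA pattern.toList = pvTransformA w.toList))
    (fun w => decide (PySem.Str.len w = PySem.Str.len pattern ∧
        (PySem.Set.ofList (pattern.toList.zip w.toList)).length = (PySem.Set.ofList pattern.toList).length ∧
        (PySem.Set.ofList pattern.toList).length = (PySem.Set.ofList w.toList).length))
    (fun x _ hx => by
      rw [decide_eq_true_iff] at hx ⊢
      exact predB_imp_predA pattern x hx)
    w0 hmem
    (by
      rw [decide_eq_true_iff]
      refine ⟨hlen0, ?_⟩
      rw [transformA_eq, transformA_eq]
      exact hstr0.symm)
    (by
      rw [decide_eq_false_iff_not]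
      rintro ⟨hl, hiso⟩
      exact hrk0 ((ranks_eq_iff_iso pattern w0 hl).mpr hiso))
  omega
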